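-- pv_equiv track=rewrite | github.com/0-0Jay/algorithm | Algorithm_GroupStudy/프로그래머스/deliveryAndPickUP.py | solution
-- ===== SOURCE A (Python) =====
-- def solution(cap, n, deliveries, pickups):
--     answer = 0
--     while deliveries and deliveries[-1] == 0: deliveries.pop(-1)
--     while pickups and pickups[-1] == 0: pickups.pop(-1)
--     while deliveries or pickups:
--         answer += 2 * max(len(deliveries), len(pickups))  # 왕복 거리 추가
--         truck = 0
--         while deliveries and truck <= cap: truck += deliveries.pop(-1)  # 가장 먼 곳부터 배달
--         if truck > cap: deliveries.append(truck - cap)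
--         truck = 0
--         while pickups and truck <= cap: truck += pickups.pop(-1)  # 가장 먼 곳부터 수거
--         if truck > cap: pickups.append(truck - cap)
--     return answer
-- ===== SOURCE B (Python) =====
-- def solution(cap, n, deliveries, pickups):
--     def trips(hs):
--         # trips[j] = number of round trips that must reach at least as far as the
--         # j-th-remaining house: running max of far-prefix sums, ceil-divided by cap
--         r = list(reversed(hs))
--         i = 0
--         while i < len(r) and r[i] == 0:  # far houses with zero demand need no trip
--             i += 1
--         ts, c, m = [], 0, 0
--         for h in r[i:]:
--             c += h
--             m = max(m, c)
--             ts.append(max(1, (m + cap - 1) // cap))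
--         return ts
--     td, tp = trips(deliveries), trips(pickups)
--     L = max(len(td), len(tp))
--     td = [0] * (L - len(td)) + td
--     tp = [0] * (L - len(tp)) + tp
--     return 2 * sum(max(a, b) for a, b in zip(td, tp))
-- ===== Notes on version B (the rewrite author's own statement) =====
-- stated objective: alternative
-- what changed: Replaces A's trip-by-trip truck simulation (pop houses from the far end until the truck exceeds cap, push back the remainder, repeat until both lists are empty) by a single backward pass per list: the trip on which each house is cleared is max(1, ceil(runningmax_of_far_prefix_sums / cap)), and the answer is twice the sum of near-aligned maxima of the two per-house trip counts.
-- outside the precondition, e.g. on solution(0, 0, [0, 0], []): A returns 0, B returns 0; on solution(-3, 0, [], [0]): A returns 0, B returns 0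
import Mathlib
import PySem

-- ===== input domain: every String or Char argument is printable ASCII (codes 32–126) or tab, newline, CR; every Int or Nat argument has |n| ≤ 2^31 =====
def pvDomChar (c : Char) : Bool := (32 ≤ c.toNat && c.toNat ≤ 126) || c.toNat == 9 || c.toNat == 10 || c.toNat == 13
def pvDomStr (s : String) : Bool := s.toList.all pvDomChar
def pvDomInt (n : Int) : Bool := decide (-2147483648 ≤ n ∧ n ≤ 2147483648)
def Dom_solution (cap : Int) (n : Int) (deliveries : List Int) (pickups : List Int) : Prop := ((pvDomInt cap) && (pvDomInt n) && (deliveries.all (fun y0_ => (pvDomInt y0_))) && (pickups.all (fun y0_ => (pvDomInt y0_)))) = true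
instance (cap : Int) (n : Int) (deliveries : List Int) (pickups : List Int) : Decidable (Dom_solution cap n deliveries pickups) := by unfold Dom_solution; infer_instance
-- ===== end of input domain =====

-- B replaces A's trip-by-trip truck simulation by one backward pass per list that
-- computes, for each house, the round trip on which it is cleared; A mutates its
-- list arguments in place (pop/append) while B does not — the equivalence proved
-- here is about the RETURN value only.

-- ===== PORT A =====
-- Python A pops from the END of the lists; the port works on the REVERSED lists, so
-- 'pop(-1)' is taking the head and 'append' is consing — value-exact, step for step.

-- 'while l and l[-1] == 0: l.pop(-1)' on the reversed list
def trimRev : List Int → List Int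
  | [] => []
  | x :: xs => if x = 0 then trimRev xs else x :: xs

-- 'truck = 0; while l and truck <= cap: truck += l.pop(-1)' on the reversed list
def loadRev (cap : Int) (truck : Int) : List Int → Int × List Int
  | [] => (truck, [])
  | x :: xs => if truck ≤ cap then loadRev cap (truck + x) xs else (truck, x :: xs)

-- the outer 'while deliveries or pickups' loop; fuel is only a totality guard
-- (under Pre_ each iteration strictly decreases the number of remaining trips,
-- which the fuel chosen in 'solution' bounds, so it is never exhausted)
def outerA (cap : Int) : Nat → Int → List Int → List Int → Int
  | 0, ans, _, _ => ans
  | fuel + 1, ans, dR, pR =>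
    if dR = [] ∧ pR = [] then ans
    else
      let ans2 := ans + 2 * (max dR.length pR.length : Int)
      let td := loadRev cap 0 dR
      let dR2 := if td.1 > cap then (td.1 - cap) :: td.2 else td.2
      let tp := loadRev cap 0 pR
      let pR2 := if tp.1 > cap then (tp.1 - cap) :: tp.2 else tp.2
      outerA cap fuel ans2 dR2 pR2

def solution (cap : Int) (n : Int) (deliveries : List Int) (pickups : List Int) : Int :=
  outerA cap ((deliveries.map Int.natAbs).sum + (pickups.map Int.natAbs).sum + 2) 0
    (trimRev deliveries.reverse) (trimRev pickups.reverse)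

-- ===== PORT B =====
-- 'while i < len(r) and r[i] == 0: i += 1' followed by 'r[i:]' (r the reversed list)
def skipZeros : List Int → List Int
  | [] => []
  | x :: xs => if x = 0 then skipZeros xs else x :: xs

-- the 'for h in r[i:]' loop of Source B: running prefix sum c, running max m,
-- emitting max(1, (m + cap - 1) // cap) per house
def tloop (cap : Int) : List Int → Int → Int → List Int
  | [], _, _ => []
  | h :: rest, c, m =>
    let c2 := c + h
    let m2 := max m c2
    max 1 (PySem.Int.floordiv (m2 + cap - 1) cap) :: tloop cap rest c2 m2

def tripsB (cap : Int) (hs : List Int) : List Int :=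
  tloop cap (skipZeros hs.reverse) 0 0

def solution_alt (cap : Int) (n : Int) (deliveries : List Int) (pickups : List Int) : Int :=
  let td := tripsB cap deliveries
  let tp := tripsB cap pickups
  let L := max td.length tp.length
  let td2 := List.replicate (L - td.length) 0 ++ td
  let tp2 := List.replicate (L - tp.length) 0 ++ tp
  2 * ((td2.zip tp2).map (fun ab => max ab.1 ab.2)).sum

-- ===== PRECONDITION & SPEC =====
-- Pre_ keeps the problem's natural domain, cap ≥ 1.  For cap ≤ 0 A's pop-until-
-- overflow loop re-appends a remainder forever and diverges on every input with a
-- nonzero entry; on the degenerate all-zero inputs where A does return 0, B also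
-- returns 0, but B's ceiling division raises for cap = 0, so cap ≤ 0 is excluded.
def Pre_solution (cap : Int) (n : Int) (deliveries : List Int) (pickups : List Int) : Prop :=
  1 ≤ cap
instance (cap : Int) (n : Int) (deliveries : List Int) (pickups : List Int) : Decidable (Pre_solution cap n deliveries pickups) := by unfold Pre_solution; infer_instance

def pvWitness_solution : Int × Int × List Int × List Int := (4, 4, [1, 0, 3, 2], [0, 3, -1, 4])

def Spec_solution (cap : Int) (n : Int) (deliveries : List Int) (pickups : List Int) (out : Int) : Prop := out = solution_alt cap n deliveries pickups
instance (cap : Int) (n : Int) (deliveries : List Int) (pickups : List Int) (out : Int) : Decidable (Spec_solution cap n deliveries pickups out) := by unfold Spec_solution; infer_instance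

-- ===== CLAIM (what is proved, stated in full; the proofs are below) =====
def Claim_equal_solution : Prop := ∀ (cap : Int) (n : Int) (deliveries : List Int) (pickups : List Int), Dom_solution cap n deliveries pickups → Pre_solution cap n deliveries pickups → Spec_solution cap n deliveries pickups (solution cap n deliveries pickups)

-- ===== LEMMAS AND PROOFS =====

-- ceiling division (x + cap - 1) // cap
def cdiv (cap x : Int) : Int := PySem.Int.floordiv (x + cap - 1) cap

-- maximum over ALL prefix sums (including the empty prefix, so pmax ≥ 0)
def pmax : List Int → Int
  | [] => 0
  | x :: xs => max 0 (x + pmax xs)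

-- maximum over the nonempty prefix sums (Source B's running max before the max-with-0)
def npmax : List Int → Int
  | [] => 0
  | x :: xs => max x (x + npmax xs)

-- R cap l i = number of round trips that reach past near-index i (l reversed+trimmed):
-- the house at far-prefix depth j is cleared on trip max(1, ceil(runmaxprefsum_j / cap))
def R (cap : Int) (l : List Int) (i : Nat) : Int :=
  if i < l.length then max 1 (cdiv cap (pmax (l.take (l.length - i)))) else 0

-- the common closed form (half of it): Σ_{i<m} max (R dR i) (R pR i)
def Gin (cap : Int) (dR pR : List Int) (m : Nat) : Int :=
  ((List.range m).map (fun i => max (R cap dR i) (R cap pR i))).sum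

lemma cdiv_le_one {cap x : Int} (hc : 1 ≤ cap) (hx : x ≤ cap) : cdiv cap x ≤ 1 := by
  have h2 : cdiv cap x < 2 := by
    unfold cdiv
    rw [PySem.Int.floordiv_lt_iff_lt_mul (by omega)]
    omega
  omega

lemma two_le_cdiv {cap x : Int} (hc : 1 ≤ cap) (hx : cap < x) : 2 ≤ cdiv cap x := by
  unfold cdiv
  rw [PySem.Int.le_floordiv_iff_mul_le (by omega)]
  omega

lemma cdiv_sub_cap {cap x : Int} (hc : 1 ≤ cap) : cdiv cap (x - cap) = cdiv cap x - 1 := by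
  unfold cdiv
  rw [PySem.Int.floordiv_eq_ediv_of_pos (by omega), PySem.Int.floordiv_eq_ediv_of_pos (by omega)]
  have he : x - cap + cap - 1 = (x + cap - 1) + (-1) * cap := by ring
  rw [he, Int.add_mul_ediv_right _ _ (by omega : cap ≠ 0)]
  linarith

lemma cdiv_le_self {cap x : Int} (hc : 1 ≤ cap) (hx : 0 ≤ x) : cdiv cap x ≤ x := by
  have h2 : cdiv cap x < x + 1 := by
    unfold cdiv
    rw [PySem.Int.floordiv_lt_iff_lt_mul (by omega)]
    nlinarith
  omega

lemma pmax_nonneg (l : List Int) : 0 ≤ pmax l := by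
  cases l with
  | nil => simp [pmax]
  | cons x xs => simp [pmax]

lemma sum_le_pmax (l : List Int) : l.sum ≤ pmax l := by
  induction l with
  | nil => simp [pmax]
  | cons x xs ih =>
    simp only [pmax, List.sum_cons]
    omega

lemma pmax_append (u v : List Int) : pmax (u ++ v) = max (pmax u) (u.sum + pmax v) := by
  induction u with
  | nil =>
    have := pmax_nonneg v
    simp [pmax]
    omega
  | cons x xs ih =>
    simp only [List.cons_append, pmax, ih, List.sum_cons]
    omega

lemma pmax_le {l : List Int} {c : Int} (h0 : 0 ≤ c) (h : ∀ j, (l.take j).sum ≤ c) :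
    pmax l ≤ c := by
  induction l generalizing c with
  | nil => simpa [pmax] using h0
  | cons x xs ih =>
    have hx : x ≤ c := by simpa using h 1
    have hxs : pmax xs ≤ max 0 (c - x) := by
      apply ih (by omega)
      intro j
      have := h (j + 1)
      simp only [List.take_succ_cons, List.sum_cons] at this
      omega
    simp only [pmax]
    omega

lemma pmax_le_sumAbs (l : List Int) : pmax l ≤ ((l.map Int.natAbs).sum : Int) := by
  induction l with
  | nil => simp [pmax]
  | cons x xs ih =>
    simp only [pmax, List.map_cons, List.sum_cons]
    have h3 : ((x.natAbs + (xs.map Int.natAbs).sum : Nat) : Int) =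
        (x.natAbs : Int) + ((xs.map Int.natAbs).sum : Int) := by
      push_cast
      ring
    rw [h3]
    omega

lemma pmax_eq_npmax (l : List Int) : pmax l = max 0 (npmax l) := by
  induction l with
  | nil => simp [pmax, npmax]
  | cons x xs ih =>
    simp only [pmax, npmax, ih]
    omega

lemma R_nonneg (cap : Int) (l : List Int) (i : Nat) : 0 ≤ R cap l i := by
  unfold R
  split <;> omega

lemma one_le_R_iff (cap : Int) (l : List Int) (i : Nat) : 1 ≤ R cap l i ↔ i < l.length := by
  unfold R
  split
  case isTrue h => simpa using h
  case isFalse h => simpa using h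

lemma R_nil (cap : Int) (i : Nat) : R cap ([] : List Int) i = 0 := by
  unfold R
  simp

lemma loadRev_spec (cap : Int) : ∀ (l : List Int) (truck : Int), ∃ pre,
    l = pre ++ (loadRev cap truck l).2 ∧
    (loadRev cap truck l).1 = truck + pre.sum ∧
    (∀ j, j < pre.length → truck + (pre.take j).sum ≤ cap) ∧
    ((loadRev cap truck l).2 ≠ [] → cap < (loadRev cap truck l).1) := by
  intro l
  induction l with
  | nil =>
    intro truck
    refine ⟨[], ?_, ?_, ?_, ?_⟩ <;> simp [loadRev]
  | cons x xs ih =>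
    intro truck
    by_cases htr : truck ≤ cap
    · obtain ⟨pre, h1, h2, h3, h4⟩ := ih (truck + x)
      have hl : loadRev cap truck (x :: xs) = loadRev cap (truck + x) xs := by
        simp [loadRev, htr]
      rw [hl]
      refine ⟨x :: pre, ?_, ?_, ?_, h4⟩
      · simpa using h1
      · simp only [List.sum_cons]
        omega
      · intro j hj
        match j with
        | 0 => simpa using htr
        | Nat.succ j =>
          simp only [List.take_succ_cons, List.sum_cons]
          have := h3 j (by simpa using hj)
          omega
    · have hl : loadRev cap truck (x :: xs) = (truck, x :: xs) := by
        simp [loadRev, htr]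
      rw [hl]
      exact ⟨[], by simp, by simp, by simp, fun _ => by omega⟩

-- one truck trip on one (reversed) list: the length does not grow and every
-- per-near-index trip count drops by exactly min(itself, 1)
lemma trip_R {cap : Int} (hc : 1 ≤ cap) (l : List Int) :
    (if (loadRev cap 0 l).1 > cap then ((loadRev cap 0 l).1 - cap) :: (loadRev cap 0 l).2 else (loadRev cap 0 l).2).length ≤ l.length ∧
    ∀ i, R cap (if (loadRev cap 0 l).1 > cap then ((loadRev cap 0 l).1 - cap) :: (loadRev cap 0 l).2 else (loadRev cap 0 l).2) i = max (R cap l i - 1) 0 := by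
  obtain ⟨pre, hsplit, hsum, hpref, hstop⟩ := loadRev_spec cap l 0
  set t1 := (loadRev cap 0 l).1 with ht1
  set rest := (loadRev cap 0 l).2 with hrest
  by_cases hcap : t1 > cap
  · rw [if_pos hcap]
    have hprene : pre ≠ [] := by
      intro h
      rw [h] at hsum
      simp at hsum
      omega
    have hplen : 1 ≤ pre.length := by
      cases pre with
      | nil => exact absurd rfl hprene
      | cons a as => simp
    have hlength : l.length = pre.length + rest.length := by
      rw [hsplit, List.length_append]
    have hfull : ∀ j, (pre.take j).sum ≤ t1 := by
      intro j
      rcases Nat.lt_or_ge j pre.length with h | h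
      · have := hpref j h
        omega
      · rw [List.take_of_length_le h]
        omega
    have hpremax : pmax pre = t1 := by
      refine le_antisymm (pmax_le (by omega) hfull) ?_
      have := sum_le_pmax pre
      omega
    constructor
    · simp only [List.length_cons]
      omega
    · intro i
      by_cases hi : i ≤ rest.length
      · have hiL : i < l.length := by omega
        have hiL' : i < ((t1 - cap) :: rest).length := by
          simp only [List.length_cons]
          omega
        have hw : 0 ≤ pmax (rest.take (rest.length - i)) := pmax_nonneg _
        have htake : l.take (l.length - i) = pre ++ rest.take (rest.length - i) := by
          have h1 : l.length - i = pre.length + (rest.length - i) := by omega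
          rw [h1]
          conv_lhs => rw [hsplit]
          rw [List.take_append, List.take_of_length_le (by omega), Nat.add_sub_cancel_left]
        have hRl : R cap l i = max 1 (cdiv cap (t1 + pmax (rest.take (rest.length - i)))) := by
          unfold R
          rw [if_pos hiL, htake, pmax_append, hpremax]
          have hmx : max t1 (pre.sum + pmax (rest.take (rest.length - i))) =
              t1 + pmax (rest.take (rest.length - i)) := by omega
          rw [hmx]
        have hlen1 : ((t1 - cap) :: rest).length - i = (rest.length - i) + 1 := by
          simp only [List.length_cons]
          omega
        have hRl' : R cap ((t1 - cap) :: rest) i =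
            max 1 (cdiv cap (t1 - cap + pmax (rest.take (rest.length - i)))) := by
          unfold R
          rw [if_pos hiL', hlen1, List.take_succ_cons]
          simp only [pmax]
          have : max 0 (t1 - cap + pmax (rest.take (rest.length - i))) =
              t1 - cap + pmax (rest.take (rest.length - i)) := by omega
          rw [this]
        rw [hRl, hRl']
        have he : t1 - cap + pmax (rest.take (rest.length - i)) =
            (t1 + pmax (rest.take (rest.length - i))) - cap := by ring
        rw [he, cdiv_sub_cap hc]
        have h2 := two_le_cdiv hc (show cap < t1 + pmax (rest.take (rest.length - i)) by omega)
        omega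
      · replace hi : rest.length < i := by omega
        have hR1 : R cap ((t1 - cap) :: rest) i = 0 := by
          unfold R
          rw [if_neg (by simp only [List.length_cons]; omega)]
        rw [hR1]
        rcases Nat.lt_or_ge i l.length with hiL | hiL
        · have hk1 : 1 ≤ l.length - i := by omega
          have hk2 : l.length - i < pre.length := by omega
          have htake : l.take (l.length - i) = pre.take (l.length - i) := by
            rw [show l.take (l.length - i) = (pre ++ rest).take (l.length - i) from by
              rw [← hsplit], List.take_append_of_le_length (by omega)]
          have hple : pmax (l.take (l.length - i)) ≤ cap := by
            rw [htake]
            apply pmax_le (by omega)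
            intro j
            rw [List.take_take]
            have := hpref (min j (l.length - i)) (by omega)
            omega
          unfold R
          rw [if_pos hiL]
          have := cdiv_le_one hc hple
          omega
        · unfold R
          rw [if_neg (by omega)]
          omega
  · rw [if_neg hcap]
    have hrestnil : rest = [] := by
      by_contra h
      exact hcap (hstop h)
    rw [hrestnil] at hsplit ⊢
    simp only [List.append_nil] at hsplit
    have hall : ∀ j, (l.take j).sum ≤ cap := by
      intro j
      rw [hsplit]
      rcases Nat.lt_or_ge j pre.length with h | h
      · have := hpref j h
        omega
      · rw [List.take_of_length_le h]
        omega
    refine ⟨by simp, ?_⟩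
    intro i
    rw [R_nil]
    rcases Nat.lt_or_ge i l.length with hiL | hiL
    · have hple : pmax (l.take (l.length - i)) ≤ cap := by
        apply pmax_le (by omega)
        intro j
        rw [List.take_take]
        have := hall (min j (l.length - i))
        omega
      unfold R
      rw [if_pos hiL]
      have := cdiv_le_one hc hple
      omega
    · unfold R
      rw [if_neg (by omega)]
      omega

lemma indicator_sum (L : Nat) : ∀ m : Nat,
    ((List.range m).map (fun i => if i < L then (1 : Int) else 0)).sum = (min L m : Nat) := by
  intro m
  induction m with
  | zero => simp
  | succ m ih =>
    rw [List.range_succ, List.map_append, List.sum_append, ih]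
    simp only [List.map_cons, List.map_nil, List.sum_cons, List.sum_nil]
    by_cases h : m < L
    · rw [if_pos h]
      push_cast
      omega
    · rw [if_neg h]
      push_cast
      omega

-- one outer iteration peels max(len,len) off Gin
lemma Gin_trip {cap : Int} {dR pR dR' pR' : List Int} {m : Nat}
    (hd' : ∀ i, R cap dR' i = max (R cap dR i - 1) 0)
    (hp' : ∀ i, R cap pR' i = max (R cap pR i - 1) 0)
    (hm : max dR.length pR.length ≤ m) :
    Gin cap dR pR m = (max dR.length pR.length : Int) + Gin cap dR' pR' m := by
  have key : ∀ i, max (R cap dR i) (R cap pR i) =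
      (if i < max dR.length pR.length then (1 : Int) else 0) +
        max (R cap dR' i) (R cap pR' i) := by
    intro i
    rw [hd' i, hp' i]
    have h0d := R_nonneg cap dR i
    have h0p := R_nonneg cap pR i
    by_cases h : i < max dR.length pR.length
    · have hone : 1 ≤ R cap dR i ∨ 1 ≤ R cap pR i := by
        rcases Nat.lt_or_ge i dR.length with h1 | h1
        · exact Or.inl ((one_le_R_iff cap dR i).mpr h1)
        · exact Or.inr ((one_le_R_iff cap pR i).mpr (by omega))
      rw [if_pos h]
      omega
    · have h1 : R cap dR i < 1 := by
        by_contra h2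
        have := (one_le_R_iff cap dR i).mp (by omega)
        omega
      have h2 : R cap pR i < 1 := by
        by_contra h2
        have := (one_le_R_iff cap pR i).mp (by omega)
        omega
      rw [if_neg h]
      omega
  unfold Gin
  simp only [key]
  rw [List.sum_map_add, indicator_sum, Nat.min_eq_left hm]
  push_cast
  ring

lemma outerA_Gin {cap : Int} (hc : 1 ≤ cap) : ∀ (fuel : Nat) (dR pR : List Int) (ans : Int) (m : Nat),
    max (R cap dR 0) (R cap pR 0) < (fuel : Int) →
    dR.length ≤ m → pR.length ≤ m →
    outerA cap fuel ans dR pR = ans + 2 * Gin cap dR pR m := by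
  intro fuel
  induction fuel with
  | zero =>
    intro dR pR ans m hfuel _ _
    exfalso
    have h1 := R_nonneg cap dR 0
    have h2 := R_nonneg cap pR 0
    simp only [Nat.cast_zero] at hfuel
    omega
  | succ fuel ih =>
    intro dR pR ans m hfuel hdm hpm
    by_cases hemp : dR = [] ∧ pR = []
    · obtain ⟨h1, h2⟩ := hemp
      subst h1
      subst h2
      have hG : Gin cap ([] : List Int) ([] : List Int) m = 0 := by
        unfold Gin
        have hz : ∀ i ∈ List.range m, max (R cap ([] : List Int) i) (R cap ([] : List Int) i) = 0 := by
          intro i _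
          rw [R_nil]
          omega
        rw [List.map_congr_left hz]
        simp
      rw [hG]
      simp [outerA]
    · obtain ⟨td1, td2⟩ := trip_R hc dR
      obtain ⟨tp1, tp2⟩ := trip_R hc pR
      set dR2 := (if (loadRev cap 0 dR).1 > cap then ((loadRev cap 0 dR).1 - cap) :: (loadRev cap 0 dR).2 else (loadRev cap 0 dR).2) with hdR2
      set pR2 := (if (loadRev cap 0 pR).1 > cap then ((loadRev cap 0 pR).1 - cap) :: (loadRev cap 0 pR).2 else (loadRev cap 0 pR).2) with hpR2
      have hdec : max (R cap dR2 0) (R cap pR2 0) < (fuel : Int) := by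
        have hne : dR ≠ [] ∨ pR ≠ [] := by
          rcases Decidable.em (dR = []) with h | h
          · exact Or.inr (fun h2 => hemp ⟨h, h2⟩)
          · exact Or.inl h
        have hone : 1 ≤ R cap dR 0 ∨ 1 ≤ R cap pR 0 := by
          rcases hne with h | h
          · exact Or.inl ((one_le_R_iff cap dR 0).mpr (List.length_pos_iff.mpr h))
          · exact Or.inr ((one_le_R_iff cap pR 0).mpr (List.length_pos_iff.mpr h))
        have e1 := td2 0
        have e2 := tp2 0
        have h0d := R_nonneg cap dR 0
        have h0p := R_nonneg cap pR 0
        push_cast at hfuel ⊢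
        omega
      have hstep : outerA cap (fuel + 1) ans dR pR =
          outerA cap fuel (ans + 2 * (max dR.length pR.length : Int)) dR2 pR2 := by
        simp only [outerA, if_neg hemp]
        rw [← hdR2, ← hpR2]
      rw [hstep, ih dR2 pR2 _ m hdec (le_trans td1 hdm) (le_trans tp1 hpm),
        Gin_trip td2 tp2 (by omega)]
      ring

-- B side
lemma skipZeros_eq_trimRev (l : List Int) : skipZeros l = trimRev l := by
  induction l with
  | nil => rfl
  | cons x xs ih =>
    unfold skipZeros trimRev
    by_cases hx : x = 0
    · rw [if_pos hx, if_pos hx, ih]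
    · rw [if_neg hx, if_neg hx]

lemma tloop_eq (cap : Int) : ∀ (l : List Int) (c m : Int),
    tloop cap l c m = (List.range l.length).map
      (fun j => max 1 (cdiv cap (max m (c + npmax (l.take (j + 1)))))) := by
  intro l
  induction l with
  | nil => intro c m; simp [tloop]
  | cons x xs ih =>
    intro c m
    simp only [tloop, List.length_cons, List.range_succ_eq_map, List.map_cons, List.map_map]
    refine congrArg₂ List.cons ?_ ?_
    · have hn : npmax ((x :: xs).take (0 + 1)) = x := by
        simp [npmax]
      unfold cdiv
      rw [hn]
    · rw [ih]
      apply List.map_congr_left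
      intro j _
      simp only [Function.comp]
      congr 2
      simp only [List.take_succ_cons, npmax]
      omega

lemma tripsB_eq (cap : Int) (hs : List Int) :
    tripsB cap hs = (List.range (trimRev hs.reverse).length).map
      (fun j => max 1 (cdiv cap (pmax ((trimRev hs.reverse).take (j + 1))))) := by
  unfold tripsB
  rw [skipZeros_eq_trimRev, tloop_eq]
  apply List.map_congr_left
  intro j _
  congr 2
  rw [pmax_eq_npmax]
  omega

lemma getD_map_range (f : Nat → Int) (n j : Nat) (h : j < n) :
    ((List.range n).map f).getD j 0 = f j := by
  rw [List.getD_eq_getElem _ _ (by simpa using h)]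
  simp

-- the near-aligned padded trip list reads off R
lemma padded_prop {cap : Int} (hs : List Int) (L : Nat)
    (hL : (trimRev hs.reverse).length ≤ L) :
    ∀ q, q < L →
      (List.replicate (L - (tripsB cap hs).length) 0 ++ tripsB cap hs).getD q 0 =
        R cap (trimRev hs.reverse) (L - 1 - q) := by
  intro q hq
  have hlen : (tripsB cap hs).length = (trimRev hs.reverse).length := by
    rw [tripsB_eq]
    simp
  set w := trimRev hs.reverse with hw
  rcases Nat.lt_or_ge q (L - w.length) with h | h
  · rw [List.getD_append _ _ _ _ (by rw [List.length_replicate]; omega),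
      List.getD_replicate]
    · unfold R
      rw [if_neg (by omega)]
    · omega
  · rw [List.getD_append_right _ _ _ _ (by rw [List.length_replicate]; omega)]
    simp only [List.length_replicate, hlen]
    have hjw : q - (L - w.length) < w.length := by omega
    rw [tripsB_eq, ← hw, getD_map_range _ _ _ hjw]
    unfold R
    rw [if_pos (by omega : L - 1 - q < w.length)]
    have hj1 : w.length - (L - 1 - q) = (q - (L - w.length)) + 1 := by omega
    rw [hj1]

lemma zip_Gin (cap : Int) (dR pR : List Int) : ∀ (u v : List Int), v.length = u.length →
    (∀ q, q < u.length → u.getD q 0 = R cap dR (u.length - 1 - q)) →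
    (∀ q, q < v.length → v.getD q 0 = R cap pR (v.length - 1 - q)) →
    ((u.zip v).map (fun ab => max ab.1 ab.2)).sum = Gin cap dR pR u.length := by
  intro u
  induction u with
  | nil =>
    intro v hv _ _
    have : v = [] := List.eq_nil_of_length_eq_zero (by simpa using hv)
    subst this
    simp [Gin]
  | cons x xs ih =>
    intro v hv hu hvp
    cases v with
    | nil => simp at hv
    | cons y ys =>
      have hlen : ys.length = xs.length := by simpa using hv
      have hx0 : x = R cap dR xs.length := by
        have h := hu 0 (by simp)
        simp only [List.getD_cons_zero, List.length_cons, Nat.add_sub_cancel, Nat.sub_zero] at h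
        exact h
      have hy0 : y = R cap pR xs.length := by
        have h := hvp 0 (by simp)
        simp only [List.getD_cons_zero, List.length_cons, Nat.add_sub_cancel, Nat.sub_zero] at h
        rw [h, hlen]
      have hxs : ∀ q, q < xs.length → xs.getD q 0 = R cap dR (xs.length - 1 - q) := by
        intro q hq
        have h := hu (q + 1) (by simp; omega)
        simp only [List.getD_cons_succ, List.length_cons, Nat.add_sub_cancel] at h
        rw [h]
        congr 1
        omega
      have hys : ∀ q, q < ys.length → ys.getD q 0 = R cap pR (ys.length - 1 - q) := by
        intro q hq
        have h := hvp (q + 1) (by simp; omega)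
        simp only [List.getD_cons_succ, List.length_cons, Nat.add_sub_cancel] at h
        rw [h]
        congr 1
        omega
      simp only [List.zip_cons_cons, List.map_cons, List.sum_cons]
      rw [ih ys hlen hxs (by rw [hlen] at hys ⊢; exact hys)]
      unfold Gin
      simp only [List.length_cons, List.range_succ, List.map_append, List.sum_append,
        List.map_cons, List.map_nil, List.sum_cons, List.sum_nil]
      rw [hx0, hy0]
      ring

lemma alt_eq_Gin {cap : Int} (n : Int) (d p : List Int) :
    solution_alt cap n d p =
      2 * Gin cap (trimRev d.reverse) (trimRev p.reverse)
        (max (trimRev d.reverse).length (trimRev p.reverse).length) := by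
  have hld : (tripsB cap d).length = (trimRev d.reverse).length := by
    rw [tripsB_eq]
    simp
  have hlp : (tripsB cap p).length = (trimRev p.reverse).length := by
    rw [tripsB_eq]
    simp
  have hrfl : solution_alt cap n d p =
      2 * (((List.replicate (max (tripsB cap d).length (tripsB cap p).length - (tripsB cap d).length) (0 : Int) ++ tripsB cap d).zip
        (List.replicate (max (tripsB cap d).length (tripsB cap p).length - (tripsB cap p).length) (0 : Int) ++ tripsB cap p)).map
          (fun ab => max ab.1 ab.2)).sum := rfl
  set L := max (tripsB cap d).length (tripsB cap p).length with hL
  have hLeq : L = max (trimRev d.reverse).length (trimRev p.reverse).length := by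
    rw [hL, hld, hlp]
  have hlu : (List.replicate (L - (tripsB cap d).length) (0 : Int) ++ tripsB cap d).length = L := by
    simp only [List.length_append, List.length_replicate]
    omega
  have hlv : (List.replicate (L - (tripsB cap p).length) (0 : Int) ++ tripsB cap p).length = L := by
    simp only [List.length_append, List.length_replicate]
    omega
  rw [hrfl, zip_Gin cap (trimRev d.reverse) (trimRev p.reverse) _ _ (by rw [hlu, hlv])
    (by rw [hlu]; exact padded_prop d L (by omega))
    (by rw [hlv]; exact padded_prop p L (by omega)), hlu, hLeq]

lemma trimRev_sumAbs (l : List Int) :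
    ((trimRev l).map Int.natAbs).sum ≤ (l.map Int.natAbs).sum := by
  induction l with
  | nil => simp [trimRev]
  | cons x xs ih =>
    unfold trimRev
    by_cases hx : x = 0
    · rw [if_pos hx]
      simp only [List.map_cons, List.sum_cons]
      omega
    · rw [if_neg hx]

lemma R_zero_le (cap : Int) (l : List Int) (hc : 1 ≤ cap) : R cap l 0 ≤ pmax l + 1 := by
  have h0 := pmax_nonneg l
  unfold R
  split
  · rw [Nat.sub_zero, List.take_length]
    have := cdiv_le_self hc h0
    omega
  · omega

-- ===== VERDICT (by name: the statement is the Claim_ definition above) =====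
theorem solution_spec : Claim_equal_solution := by
  intro cap n d p _ hpre
  have hc : 1 ≤ cap := hpre
  unfold Spec_solution
  rw [alt_eq_Gin n d p]
  unfold solution
  set dR := trimRev d.reverse with hdR
  set pR := trimRev p.reverse with hpR
  have hda : (dR.map Int.natAbs).sum ≤ (d.map Int.natAbs).sum := by
    rw [hdR]
    refine le_trans (trimRev_sumAbs _) ?_
    rw [List.map_reverse, List.sum_reverse]
  have hpa : (pR.map Int.natAbs).sum ≤ (p.map Int.natAbs).sum := by
    rw [hpR]
    refine le_trans (trimRev_sumAbs _) ?_
    rw [List.map_reverse, List.sum_reverse]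
  have hfd : R cap dR 0 ≤ ((d.map Int.natAbs).sum : Int) + 1 := by
    have h1 := R_zero_le cap dR hc
    have h2 := pmax_le_sumAbs dR
    have h3 : ((dR.map Int.natAbs).sum : Int) ≤ ((d.map Int.natAbs).sum : Int) := by
      exact_mod_cast hda
    omega
  have hfp : R cap pR 0 ≤ ((p.map Int.natAbs).sum : Int) + 1 := by
    have h1 := R_zero_le cap pR hc
    have h2 := pmax_le_sumAbs pR
    have h3 : ((pR.map Int.natAbs).sum : Int) ≤ ((p.map Int.natAbs).sum : Int) := by
      exact_mod_cast hpa
    omega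
  have hfuel : max (R cap dR 0) (R cap pR 0) <
      (((d.map Int.natAbs).sum + (p.map Int.natAbs).sum + 2 : Nat) : Int) := by
    have h0d := R_nonneg cap dR 0
    have h0p := R_nonneg cap pR 0
    omega
  rw [outerA_Gin hc _ dR pR 0 (max dR.length pR.length) hfuel (le_max_left _ _) (le_max_right _ _)]
  ring
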